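-- pv_equiv track=rewrite | github.com/WyattBlair77/fractal_rendering | fractals.py | _state_to_edges
-- ===== SOURCE A (Python) =====
-- def _state_to_edges(length, state):
--     """Convert L-system state string to edge list."""
--     edges = []
--     current_angle = 0
--
--     for char in state:
--         if char in ('A', 'B'):  # Both A and B mean forward
--             edges.append({'length': length, 'angle': current_angle})
--         elif char == '+':
--             current_angle += 60
--         elif char == '-':
--             current_angle -= 60
--
--     return edges
-- ===== SOURCE B (Python) =====
-- def _state_to_edges(length, state):
--     """Convert L-system state string to edge list (two-pass: angle prefix sums, then comprehension)."""
--     deltas = [60 if c == '+' else -60 if c == '-' else 0 for c in state]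
--     angles = []
--     total = 0
--     for d in deltas:
--         total += d
--         angles.append(total)
--     return [{'length': length, 'angle': a}
--             for c, a in zip(state, angles)
--             if c in ('A', 'B')]
-- ===== Notes on version B (the rewrite author's own statement) =====
-- stated objective: alternative
-- what changed: Replaces the single stateful loop by two differently-shaped passes: a prefix-sum scan of per-character angle deltas, then a zip-comprehension emitting edges for 'A'/'B' characters.
import Mathlib
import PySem

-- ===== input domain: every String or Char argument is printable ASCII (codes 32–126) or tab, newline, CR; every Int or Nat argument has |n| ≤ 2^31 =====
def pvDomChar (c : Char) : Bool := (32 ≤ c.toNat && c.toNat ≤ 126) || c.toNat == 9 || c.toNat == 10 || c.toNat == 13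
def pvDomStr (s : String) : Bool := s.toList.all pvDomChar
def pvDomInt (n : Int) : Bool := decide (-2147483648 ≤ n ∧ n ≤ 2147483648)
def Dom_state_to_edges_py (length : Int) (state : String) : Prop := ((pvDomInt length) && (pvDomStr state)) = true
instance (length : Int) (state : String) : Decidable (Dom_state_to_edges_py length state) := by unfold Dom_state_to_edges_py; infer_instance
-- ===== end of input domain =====

-- B replaces A's single stateful loop by a prefix-sum scan of angle deltas plus a zip/filterMap emission pass (alternative decomposition, same cost).


-- ===== PORT A =====
-- one pass; state = (edges so far, current_angle); branch order as in the Python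
def state_to_edges_py (length : Int) (state : String) : List (List (String × Int)) :=
  (state.toList.foldl
    (fun (acc : List (List (String × Int)) × Int) char =>
      if char = 'A' ∨ char = 'B' then
        (acc.1 ++ [[("length", length), ("angle", acc.2)]], acc.2)
      else if char = '+' then (acc.1, acc.2 + 60)
      else if char = '-' then (acc.1, acc.2 - 60)
      else acc)
    ([], 0)).1

-- ===== PORT B =====
-- running prefix sums of the deltas (B's accumulate loop)
def pvScanSum : Int → List Int → List Int
  | _, [] => []
  | t, d :: ds => (t + d) :: pvScanSum (t + d) ds

def state_to_edges_py_alt (length : Int) (state : String) : List (List (String × Int)) :=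
  let deltas := state.toList.map (fun c => if c = '+' then 60 else if c = '-' then (-60) else 0)
  let angles := pvScanSum 0 deltas
  (state.toList.zip angles).filterMap (fun p =>
    if p.1 = 'A' ∨ p.1 = 'B' then some [("length", length), ("angle", p.2)] else none)

-- ===== PRECONDITION & SPEC =====
def Spec_state_to_edges_py (length : Int) (state : String) (out : List (List (String × Int))) : Prop := out = state_to_edges_py_alt length state
instance (length : Int) (state : String) (out : List (List (String × Int))) : Decidable (Spec_state_to_edges_py length state out) := by unfold Spec_state_to_edges_py; infer_instance

-- ===== CLAIM (what is proved, stated in full; the proofs are below) =====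
def Claim_equal_state_to_edges_py : Prop := ∀ (length : Int) (state : String), Dom_state_to_edges_py length state → Spec_state_to_edges_py length state (state_to_edges_py length state)

-- ===== LEMMAS AND PROOFS =====

-- loop invariant: A's fold from any (acc, a) equals acc ++ B's zip/filterMap with the scan seeded at a
lemma fold_eq_scan (length : Int) :
    ∀ (cs : List Char) (a : Int) (acc : List (List (String × Int))),
      (cs.foldl
        (fun (st : List (List (String × Int)) × Int) char =>
          if char = 'A' ∨ char = 'B' then
            (st.1 ++ [[("length", length), ("angle", st.2)]], st.2)
          else if char = '+' then (st.1, st.2 + 60)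
          else if char = '-' then (st.1, st.2 - 60)
          else st)
        (acc, a)).1
      = acc ++ (cs.zip (pvScanSum a (cs.map (fun c => if c = '+' then 60 else if c = '-' then (-60) else 0)))).filterMap
          (fun p => if p.1 = 'A' ∨ p.1 = 'B' then some [("length", length), ("angle", p.2)] else none) := by
  intro cs
  induction cs with
  | nil => intro a acc; simp [pvScanSum]
  | cons c cs ih =>
    intro a acc
    by_cases hAB : c = 'A' ∨ c = 'B'
    · have hp : ¬ c = '+' := by rcases hAB with h | h <;> simp [h]
      have hm : ¬ c = '-' := by rcases hAB with h | h <;> simp [h]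
      simp [List.foldl_cons, pvScanSum, hAB, hp, hm, ih]
    · by_cases hp : c = '+'
      · simp [List.foldl_cons, pvScanSum, hp, ih]
      · by_cases hm : c = '-'
        · simpa [List.foldl_cons, pvScanSum, hAB, hp, hm, sub_eq_add_neg] using ih (a - 60) acc
        · simp [List.foldl_cons, pvScanSum, hAB, hp, hm, ih]

-- ===== VERDICT (by name: the statement is the Claim_ definition above) =====
theorem state_to_edges_py_spec : Claim_equal_state_to_edges_py := by
  intro length state _
  show state_to_edges_py length state = state_to_edges_py_alt length state
  simp [state_to_edges_py, state_to_edges_py_alt, fold_eq_scan]
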